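-- pv_equiv track=rewrite | github.com/congzhangIDG/rag-skill | rag/chunker.py | _recursiveSplitToSpans
-- ===== SOURCE A (Python) =====
-- from typing import List, Optional, Tuple
--
-- def _recursiveSplitToSpans(
--   text: str,
--   start: int,
--   end: int,
--   separators: List[str],
--   sep_index: int,
--   chunk_size: int,
-- ) -> List[Tuple[int, int]]:
--   if end <= start:
--     return []
--
--   if sep_index >= len(separators):
--     return _forceSliceToSpans(start, end, chunk_size)
--
--   sep = separators[sep_index]
--   if sep == "":
--     return _forceSliceToSpans(start, end, chunk_size)
--
--   pieces = _splitRangeBySeparator(text, start, end, sep)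
--   if len(pieces) == 1:
--     return _recursiveSplitToSpans(text, start, end, separators, sep_index + 1, chunk_size)
--
--   spans: List[Tuple[int, int]] = []
--   for (ps, pe) in pieces:
--     if pe - ps > chunk_size:
--       spans.extend(_recursiveSplitToSpans(text, ps, pe, separators, sep_index + 1, chunk_size))
--     else:
--       spans.append((ps, pe))
--   return spans
--
-- def _splitRangeBySeparator(text: str, start: int, end: int, sep: str) -> List[Tuple[int, int]]:
--   spans: List[Tuple[int, int]] = []
--   i = start
--   while True:
--     j = text.find(sep, i, end)
--     if j == -1:
--       break
--     piece_end = j + len(sep)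
--     spans.append((i, piece_end))
--     i = piece_end
--   spans.append((i, end))
--   return spans
--
-- def _forceSliceToSpans(start: int, end: int, chunk_size: int) -> List[Tuple[int, int]]:
--   spans: List[Tuple[int, int]] = []
--   i = start
--   while i < end:
--     j = min(i + chunk_size, end)
--     spans.append((i, j))
--     i = j
--   return spans
-- ===== SOURCE B (Python) =====
-- from typing import List, Optional, Tuple
--
-- def _recursiveSplitToSpans(
--   text: str,
--   start: int,
--   end: int,
--   separators: List[str],
--   sep_index: int,
--   chunk_size: int,
-- ) -> List[Tuple[int, int]]:
--   # Iterative DFS over an explicit stack of frames; None-tagged items are ready spans.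
--   out: List[Tuple[int, int]] = []
--   stack: List[Tuple[int, int, Optional[int]]] = [(start, end, sep_index)]
--   while stack:
--     s, e, k = stack.pop()
--     if k is None:
--       out.append((s, e))
--       continue
--     if e <= s:
--       continue
--     if k >= len(separators) or separators[k] == "":
--       out.extend(_forceSliceToSpans(s, e, chunk_size))
--       continue
--     pieces = _splitRangeBySeparator(text, s, e, separators[k])
--     if len(pieces) == 1:
--       stack.append((s, e, k + 1))
--     else:
--       for ps, pe in reversed(pieces):
--         if pe - ps > chunk_size:
--           stack.append((ps, pe, k + 1))
--         else:
--           stack.append((ps, pe, None))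
--   return out
--
-- def _splitRangeBySeparator(text: str, start: int, end: int, sep: str) -> List[Tuple[int, int]]:
--   spans: List[Tuple[int, int]] = []
--   i = start
--   while True:
--     j = text.find(sep, i, end)
--     if j == -1:
--       break
--     piece_end = j + len(sep)
--     spans.append((i, piece_end))
--     i = piece_end
--   spans.append((i, end))
--   return spans
--
-- def _forceSliceToSpans(start: int, end: int, chunk_size: int) -> List[Tuple[int, int]]:
--   spans: List[Tuple[int, int]] = []
--   i = start
--   while i < end:
--     j = min(i + chunk_size, end)
--     spans.append((i, j))
--     i = j
--   return spans
-- ===== Notes on version B (the rewrite author's own statement) =====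
-- stated objective: alternative
-- what changed: Replaces A's recursion with an iterative while-loop over an explicit stack of frames and emit-tagged spans (children pushed in reverse to preserve the depth-first output order), reusing the two helper functions unchanged.
import Mathlib
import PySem

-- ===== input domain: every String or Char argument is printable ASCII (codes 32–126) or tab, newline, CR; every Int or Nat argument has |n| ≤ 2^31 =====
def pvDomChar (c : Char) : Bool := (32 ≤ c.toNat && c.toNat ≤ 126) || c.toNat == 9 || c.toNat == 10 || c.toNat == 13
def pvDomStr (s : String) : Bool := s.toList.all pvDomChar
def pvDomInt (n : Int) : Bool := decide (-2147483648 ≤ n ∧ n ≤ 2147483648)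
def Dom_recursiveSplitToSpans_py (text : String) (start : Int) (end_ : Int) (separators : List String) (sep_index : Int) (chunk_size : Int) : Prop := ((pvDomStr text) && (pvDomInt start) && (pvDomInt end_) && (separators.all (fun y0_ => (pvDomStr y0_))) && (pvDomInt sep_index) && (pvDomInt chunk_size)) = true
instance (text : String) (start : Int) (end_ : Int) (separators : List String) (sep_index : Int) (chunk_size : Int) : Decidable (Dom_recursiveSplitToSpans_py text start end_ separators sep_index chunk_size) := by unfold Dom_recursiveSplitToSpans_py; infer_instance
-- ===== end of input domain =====

-- ===== PORT A =====
-- B is an explicit-stack iterative re-implementation of A's recursion (same helpers); return values proved equal.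
-- helper: _forceSliceToSpans (the Python loop diverges when chunk_size <= 0 and start < end; that case is outside Pre_)
def pvForceSlice (i : Int) (end_ : Int) (chunk_size : Int) : List (Int × Int) :=
  if _h : i < end_ ∧ 1 ≤ chunk_size then
    (i, min (i + chunk_size) end_) :: pvForceSlice (min (i + chunk_size) end_) end_ chunk_size
  else []
termination_by (end_ - i).toNat
decreasing_by omega

-- helper: _splitRangeBySeparator; the fuel bounds the while-loop (text.length + 2 iterations always
-- suffice for a non-empty sep: each match index strictly increases inside [0, text.length])
def pvSplitRange (text : List Char) (end_ : Int) (sep : List Char) : Nat → Int → List (Int × Int)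
  | 0, i => [(i, end_)]
  | n + 1, i =>
    let j := PySem.Chars.findFrom text sep i (some end_)
    if j = -1 then [(i, end_)]
    else (i, j + sep.length) :: pvSplitRange text end_ sep n (j + sep.length)

def recursiveSplitToSpans_py (text : String) (start : Int) (end_ : Int) (separators : List String) (sep_index : Int) (chunk_size : Int) : List (Int × Int) :=
  if end_ ≤ start then []
  else if (separators.length : Int) ≤ sep_index then pvForceSlice start end_ chunk_size
  else
    match PySem.List.pyGet? separators sep_index with
    | none => []  -- Python raises IndexError here (sep_index < -len(separators)); excluded by Pre_
    | some sep =>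
      if sep = "" then pvForceSlice start end_ chunk_size
      else
        let pieces := pvSplitRange text.toList end_ sep.toList (text.length + 2) start
        if pieces.length = 1 then
          recursiveSplitToSpans_py text start end_ separators (sep_index + 1) chunk_size
        else
          pieces.foldl (fun spans p =>
            if chunk_size < p.2 - p.1 then
              spans ++ recursiveSplitToSpans_py text p.1 p.2 separators (sep_index + 1) chunk_size
            else spans ++ [p]) []
termination_by ((separators.length : Int) - sep_index).toNat
decreasing_by all_goals omega

-- ===== PORT B =====
-- stack items: (s, e, some k) = a frame still to split; (s, e, none) = a finished span to emit
def pvItemWeight (L : Int) (W : Nat) (it : Int × Int × Option Int) : Nat :=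
  match it.2.2 with
  | none => 1
  | some k => W ^ ((L - k).toNat + 1)

def pvStackWeight (L : Int) (W : Nat) (st : List (Int × Int × Option Int)) : Nat :=
  (st.map (pvItemWeight L W)).sum

-- the termination measure of the loop: see pvLoop_push_lt below
theorem pvSplitRange_length_le (text : List Char) (end_ : Int) (sep : List Char) :
    ∀ (n : Nat) (i : Int), (pvSplitRange text end_ sep n i).length ≤ n + 1 := by
  intro n
  induction n with
  | zero => intro i; simp [pvSplitRange]
  | succ n ih =>
    intro i
    simp only [pvSplitRange]
    split
    · simp
    · simpa using Nat.succ_le_succ (ih _)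

theorem pvLoop_pop_lt (L : Int) (W : Nat) (hW : 2 ≤ W) (it : Int × Int × Option Int)
    (st : List (Int × Int × Option Int)) :
    pvStackWeight L W st < pvStackWeight L W (it :: st) := by
  have h1 : 1 ≤ pvItemWeight L W it := by
    unfold pvItemWeight
    split
    · omega
    · exact Nat.one_le_iff_ne_zero.mpr (pow_ne_zero _ (by omega))
  simp [pvStackWeight]
  omega

theorem pvLoop_single_lt (L : Int) (W : Nat) (hW : 2 ≤ W) (s e : Int) (k : Int) (hk : k < L)
    (st : List (Int × Int × Option Int)) :
    pvStackWeight L W ((s, e, some (k + 1)) :: st) < pvStackWeight L W ((s, e, some k) :: st) := by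
  simp only [pvStackWeight, List.map_cons, List.sum_cons]
  have : pvItemWeight L W (s, e, some (k + 1)) < pvItemWeight L W (s, e, some k) := by
    simp only [pvItemWeight]
    exact Nat.pow_lt_pow_right (by omega) (by omega)
  omega

theorem pvLoop_push_lt (L : Int) (W : Nat) (hW : 2 ≤ W) (s e : Int) (k : Int) (hk : k < L)
    (pieces : List (Int × Int)) (hlen : pieces.length < W)
    (f : Int × Int → Int × Int × Option Int)
    (hf : ∀ p ∈ pieces, pvItemWeight L W (f p) ≤ W ^ ((L - (k + 1)).toNat + 1))
    (st : List (Int × Int × Option Int)) :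
    pvStackWeight L W (pieces.map f ++ st) < pvStackWeight L W ((s, e, some k) :: st) := by
  simp only [pvStackWeight, List.map_append, List.sum_append, List.map_cons, List.sum_cons,
    List.map_map]
  have hsum : ((pieces.map f).map (pvItemWeight L W)).sum ≤
      pieces.length * W ^ ((L - (k + 1)).toNat + 1) := by
    calc ((pieces.map f).map (pvItemWeight L W)).sum
        ≤ ((pieces.map f).map (pvItemWeight L W)).length * W ^ ((L - (k + 1)).toNat + 1) := by
          refine List.sum_le_card_nsmul _ _ ?_
          intro x hx
          simp only [List.mem_map] at hx
          obtain ⟨y, ⟨p, hp, rfl⟩, rfl⟩ := hx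
          exact hf p hp
      _ = pieces.length * W ^ ((L - (k + 1)).toNat + 1) := by simp
  have hpow : pieces.length * W ^ ((L - (k + 1)).toNat + 1) < W ^ ((L - k).toNat + 1) := by
    have he : (L - k).toNat + 1 = ((L - (k + 1)).toNat + 1) + 1 := by omega
    rw [he, pow_succ]
    have hpos : 0 < W ^ ((L - (k + 1)).toNat + 1) := Nat.pow_pos (show 0 < W by omega)
    calc pieces.length * W ^ ((L - (k + 1)).toNat + 1)
        < W * W ^ ((L - (k + 1)).toNat + 1) := by
          exact Nat.mul_lt_mul_of_lt_of_le hlen (le_refl _) hpos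
      _ = W ^ ((L - (k + 1)).toNat + 1) * W := by ring
  have hit : pvItemWeight L W (s, e, some k) = W ^ ((L - k).toNat + 1) := rfl
  simp only [List.map_map] at hsum ⊢
  omega

def pvLoop (text : String) (separators : List String) (chunk_size : Int)
    (stack : List (Int × Int × Option Int)) (out : List (Int × Int)) : List (Int × Int) :=
  match stack with
  | [] => out
  | (s, e, none) :: st => pvLoop text separators chunk_size st (out ++ [(s, e)])
  | (s, e, some k) :: st =>
    if e ≤ s then pvLoop text separators chunk_size st out
    else if (separators.length : Int) ≤ k then
      pvLoop text separators chunk_size st (out ++ pvForceSlice s e chunk_size)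
    else
      match PySem.List.pyGet? separators k with
      | none => pvLoop text separators chunk_size st out  -- Python raises IndexError; excluded by Pre_
      | some sep =>
        if sep = "" then pvLoop text separators chunk_size st (out ++ pvForceSlice s e chunk_size)
        else
          let pieces := pvSplitRange text.toList e sep.toList (text.length + 2) s
          if pieces.length = 1 then
            pvLoop text separators chunk_size ((s, e, some (k + 1)) :: st) out
          else
            pvLoop text separators chunk_size
              (pieces.map (fun p =>
                if chunk_size < p.2 - p.1 then (p.1, p.2, some (k + 1)) else (p.1, p.2, none)) ++ st)
              out
termination_by pvStackWeight (separators.length : Int) (text.length + 4) stack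
decreasing_by
  · exact pvLoop_pop_lt _ _ (by omega) _ _
  · exact pvLoop_pop_lt _ _ (by omega) _ _
  · exact pvLoop_pop_lt _ _ (by omega) _ _
  · exact pvLoop_pop_lt _ _ (by omega) _ _
  · exact pvLoop_pop_lt _ _ (by omega) _ _
  · exact pvLoop_single_lt _ _ (by omega) _ _ _ (by omega) _
  · refine pvLoop_push_lt _ _ (by omega) s e k (by omega) _ ?_ _ ?_ _
    · have := pvSplitRange_length_le text.toList e sep.toList (text.length + 2) s
      omega
    · intro p _
      dsimp only
      split
      · simp [pvItemWeight]
      · simp only [pvItemWeight]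
        exact Nat.one_le_iff_ne_zero.mpr (pow_ne_zero _ (by omega))

def recursiveSplitToSpans_py_alt (text : String) (start : Int) (end_ : Int) (separators : List String) (sep_index : Int) (chunk_size : Int) : List (Int × Int) :=
  pvLoop text separators chunk_size [(start, end_, some sep_index)] []

-- ===== PRECONDITION & SPEC =====
-- Pre_ excludes exactly the inputs (with end > start) where Python A does not return: chunk_size <= 0
-- makes _forceSliceToSpans loop forever, and sep_index < -len(separators) raises IndexError.
def Pre_recursiveSplitToSpans_py (text : String) (start : Int) (end_ : Int) (separators : List String) (sep_index : Int) (chunk_size : Int) : Prop :=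
  end_ ≤ start ∨ (1 ≤ chunk_size ∧ ((separators.length : Int) ≤ sep_index ∨ -(separators.length : Int) ≤ sep_index))
instance (text : String) (start : Int) (end_ : Int) (separators : List String) (sep_index : Int) (chunk_size : Int) : Decidable (Pre_recursiveSplitToSpans_py text start end_ separators sep_index chunk_size) := by unfold Pre_recursiveSplitToSpans_py; infer_instance

def pvWitness_recursiveSplitToSpans_py : String × Int × Int × List String × Int × Int :=
  ("ab, cd. ef", 0, 10, [". ", ", "], 0, 4)

def Spec_recursiveSplitToSpans_py (text : String) (start : Int) (end_ : Int) (separators : List String) (sep_index : Int) (chunk_size : Int) (out : List (Int × Int)) : Prop := out = recursiveSplitToSpans_py_alt text start end_ separators sep_index chunk_size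
instance (text : String) (start : Int) (end_ : Int) (separators : List String) (sep_index : Int) (chunk_size : Int) (out : List (Int × Int)) : Decidable (Spec_recursiveSplitToSpans_py text start end_ separators sep_index chunk_size out) := by unfold Spec_recursiveSplitToSpans_py; infer_instance

-- ===== CLAIM (what is proved, stated in full; the proofs are below) =====
def Claim_equal_recursiveSplitToSpans_py : Prop := ∀ (text : String) (start : Int) (end_ : Int) (separators : List String) (sep_index : Int) (chunk_size : Int), Dom_recursiveSplitToSpans_py text start end_ separators sep_index chunk_size → Pre_recursiveSplitToSpans_py text start end_ separators sep_index chunk_size → Spec_recursiveSplitToSpans_py text start end_ separators sep_index chunk_size (recursiveSplitToSpans_py text start end_ separators sep_index chunk_size)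

-- ===== LEMMAS AND PROOFS =====
theorem pv_step (text : String) (separators : List String) (chunk_size : Int) :
    ∀ (t : Nat) (k : Int), ((separators.length : Int) - k).toNat ≤ t →
    ∀ (s e : Int) (st : List (Int × Int × Option Int)) (out : List (Int × Int)),
      pvLoop text separators chunk_size ((s, e, some k) :: st) out =
        pvLoop text separators chunk_size st
          (out ++ recursiveSplitToSpans_py text s e separators k chunk_size) := by
  intro t
  induction t with
  | zero =>
    intro k hk s e st out
    have hL : (separators.length : Int) ≤ k := by omega
    rw [pvLoop, recursiveSplitToSpans_py]
    by_cases hse : e ≤ s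
    · simp [hse]
    · simp [hse, hL]
  | succ t ih =>
    intro k hk s e st out
    rw [pvLoop, recursiveSplitToSpans_py]
    by_cases hse : e ≤ s
    · simp [hse]
    by_cases hL : (separators.length : Int) ≤ k
    · simp [hse, hL]
    cases hget : PySem.List.pyGet? separators k with
    | none => simp [hse, hL]
    | some sep =>
      by_cases hnil : sep = ""
      · simp [hse, hL, hnil]
      · simp only [hse, hL, hnil, ite_false]
        by_cases hone :
            (pvSplitRange text.toList e sep.toList (text.length + 2) s).length = 1
        · simp only [hone, ite_true]
          exact ih (k + 1) (by omega) s e st out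
        · simp only [hone, ite_false]
          generalize pvSplitRange text.toList e sep.toList (text.length + 2) s = pieces
          have hfold : ∀ (acc : List (Int × Int)),
              pieces.foldl (fun spans p =>
                if chunk_size < p.2 - p.1 then
                  spans ++ recursiveSplitToSpans_py text p.1 p.2 separators (k + 1) chunk_size
                else spans ++ [p]) acc =
              acc ++ pieces.flatMap (fun p =>
                if chunk_size < p.2 - p.1 then
                  recursiveSplitToSpans_py text p.1 p.2 separators (k + 1) chunk_size
                else [p]) := by
            intro acc
            have hfn : (fun (spans : List (Int × Int)) (p : Int × Int) =>
                if chunk_size < p.2 - p.1 then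
                  spans ++ recursiveSplitToSpans_py text p.1 p.2 separators (k + 1) chunk_size
                else spans ++ [p]) = (fun spans p => spans ++
                  (if chunk_size < p.2 - p.1 then
                    recursiveSplitToSpans_py text p.1 p.2 separators (k + 1) chunk_size
                  else [p])) := by
              funext spans p
              by_cases hc : chunk_size < p.2 - p.1 <;> simp [hc]
            rw [hfn, PySem.List.foldl_append_eq_flatMap]
          rw [hfold]
          simp only [List.nil_append]
          clear hfold hone
          induction pieces generalizing out with
          | nil => simp
          | cons p ps ihp =>
            by_cases hc : chunk_size < p.2 - p.1
            · simp only [List.map_cons, hc, ite_true, List.cons_append]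
              rw [ih (k + 1) (by omega) p.1 p.2 (ps.map _ ++ st) out, ihp]
              simp [hc]
            · simp only [List.map_cons, hc, ite_false, List.cons_append]
              rw [pvLoop, ihp]
              simp [hc]

-- ===== VERDICT (by name: the statement is the Claim_ definition above) =====
theorem recursiveSplitToSpans_py_spec : Claim_equal_recursiveSplitToSpans_py := by
  intro text start end_ separators sep_index chunk_size _ _
  unfold Spec_recursiveSplitToSpans_py recursiveSplitToSpans_py_alt
  rw [pv_step text separators chunk_size (((separators.length : Int) - sep_index).toNat) sep_index le_rfl]
  simp [pvLoop]
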